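-- pv_equiv track=rewrite | github.com/Megamjm/Comfyvn-ToolProject | comfyvn/qa/playtest/headless_runner.py | _slugify_token
-- ===== SOURCE A (Python) =====
-- def _slugify_token(value: str) -> str:
--     if not value:
--         return "default"
--     slug = "".join(ch.lower() if ch.isalnum() else "-" for ch in value)
--     while "--" in slug:
--         slug = slug.replace("--", "-")
--     slug = slug.strip("-")
--     return slug or "default"
-- ===== SOURCE B (Python) =====
-- def _slugify_token(value: str) -> str:
--     if not value:
--         return "default"
--     out = []
--     prev_dash = False
--     for ch in value:
--         if ch.isalnum():
--             out.append(ch.lower())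
--             prev_dash = False
--         elif not prev_dash:
--             out.append("-")
--             prev_dash = True
--     slug = "".join(out).strip("-")
--     return slug or "default"
-- ===== Notes on version B (the rewrite author's own statement) =====
-- stated objective: simpler
-- what changed: B collapses consecutive dashes inline in one forward pass using a last-emitted-was-dash flag, instead of building the full dashed string and then repeatedly rescanning and rewriting it with A's while-substring-replace loop.
import Mathlib
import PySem

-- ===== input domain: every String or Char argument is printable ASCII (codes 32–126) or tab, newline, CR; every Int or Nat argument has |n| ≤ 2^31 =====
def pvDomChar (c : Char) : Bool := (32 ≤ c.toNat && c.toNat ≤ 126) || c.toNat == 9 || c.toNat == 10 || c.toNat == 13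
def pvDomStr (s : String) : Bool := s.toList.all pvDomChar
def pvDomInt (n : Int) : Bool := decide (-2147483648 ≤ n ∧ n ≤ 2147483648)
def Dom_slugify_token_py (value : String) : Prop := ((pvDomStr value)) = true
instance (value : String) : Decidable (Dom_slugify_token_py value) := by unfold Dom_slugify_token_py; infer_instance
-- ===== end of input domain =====

-- B collapses dash runs inline in one forward pass with a last-was-dash flag,
-- instead of A's build-then-rescan while '--'-replace loop (objective: simpler).

-- ===== PORT A =====
-- one pass of slug.replace("--", "-"): used only to prove that A's while-loop terminates
def repDash : List Char → List Char
  | [] => []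
  | [c] => [c]
  | c :: d :: rest => if c = '-' ∧ d = '-' then '-' :: repDash rest else c :: repDash (d :: rest)

theorem replace_go_eq_repDash (fuel : Nat) : ∀ (l acc : List Char), l.length ≤ fuel →
    PySem.Chars.replace.go ['-', '-'] ['-'] fuel l acc = acc.reverse ++ repDash l := by
  induction fuel with
  | zero =>
    intro l acc h
    have : l = [] := List.eq_nil_of_length_eq_zero (Nat.le_zero.mp h)
    subst this
    simp [PySem.Chars.replace.go, repDash]
  | succ n ih =>
    intro l acc h
    match l with
    | [] => simp [PySem.Chars.replace.go, repDash]
    | c :: t =>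
      rw [PySem.Chars.replace.go]
      by_cases hp : List.isPrefixOf ['-', '-'] (c :: t) = true
      · rw [if_pos hp]
        have hp' : c = '-' ∧ ∃ u, t = '-' :: u := by
          match t with
          | [] => simp [List.isPrefixOf] at hp
          | d :: u =>
            simp [List.isPrefixOf] at hp
            exact ⟨hp.1.symm, u, by rw [← hp.2]⟩
        obtain ⟨hc, u, ht⟩ := hp'
        subst hc; subst ht
        simp only [List.length_cons] at h
        rw [show List.drop (['-', '-'] : List Char).length ('-' :: '-' :: u) = u from rfl]
        rw [ih u _ (by omega)]
        simp [repDash]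
      · rw [if_neg hp]
        simp only [List.length_cons] at h
        rw [ih t (c :: acc) (by omega)]
        have hr : repDash (c :: t) = c :: repDash t := by
          match t with
          | [] => rfl
          | d :: u =>
            rw [repDash, if_neg]
            intro ⟨h1, h2⟩
            subst h1; subst h2
            simp [List.isPrefixOf] at hp
        rw [hr]
        simp

theorem replace_eq_repDash (s : List Char) :
    PySem.Chars.replace s ['-', '-'] ['-'] = repDash s := by
  rw [PySem.Chars.replace]
  simp only [List.isEmpty_cons, if_false, Bool.false_eq_true]
  rw [replace_go_eq_repDash s.length s [] (le_refl _)]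
  simp

theorem repDash_length_le (s : List Char) : (repDash s).length ≤ s.length := by
  induction s using repDash.induct with
  | case1 => simp [repDash]
  | case2 c => simp [repDash]
  | case3 c d rest h ih => rw [repDash, if_pos h]; simp; omega
  | case4 c d rest h ih => rw [repDash, if_neg h]; simpa using ih

theorem repDash_length_lt (s : List Char) (h : ['-', '-'] <:+: s) :
    (repDash s).length < s.length := by
  induction s using repDash.induct with
  | case1 => simp at h
  | case2 c =>
    rcases h with ⟨p, q, hpq⟩
    have := congrArg List.length hpq
    simp at this
    omega
  | case3 c d rest hcd ih =>
    rw [repDash, if_pos hcd]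
    have := repDash_length_le rest
    simp only [List.length_cons]
    omega
  | case4 c d rest hcd ih =>
    rw [repDash, if_neg hcd]
    have h' : ['-', '-'] <:+: d :: rest := by
      rcases (List.infix_cons_iff).mp h with hpre | htl
      · exfalso
        rcases hpre with ⟨q, hq⟩
        cases hq
        exact hcd ⟨rfl, rfl⟩
      · exact htl
    have := ih h'
    simp only [List.length_cons] at this ⊢
    omega

theorem replace_dash_lt (s : List Char) (h : PySem.Chars.isIn ['-', '-'] s = true) :
    (PySem.Chars.replace s ['-', '-'] ['-']).length < s.length := by
  rw [replace_eq_repDash]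
  exact repDash_length_lt s ((PySem.Chars.isIn_iff_infix _ _).mp h)

-- the Python while loop:  while "--" in slug: slug = slug.replace("--", "-")
def collapseA (s : List Char) : List Char :=
  if h : PySem.Chars.isIn ['-', '-'] s = true then
    collapseA (PySem.Chars.replace s ['-', '-'] ['-'])
  else s
termination_by s.length
decreasing_by exact replace_dash_lt s h

def slugify_token_py (value : String) : String :=
  if value = "" then "default"
  else
    let slug := value.toList.map (fun ch =>
      if PySem.Chars.isalnum ch then PySem.Chars.lowerChar ch else '-')
    let slug := collapseA slug
    let slug := PySem.Chars.stripChars slug ['-']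
    if slug = [] then "default" else String.mk slug

-- ===== PORT B =====
def slugify_token_py_alt (value : String) : String :=
  if value = "" then "default"
  else
    let st := value.toList.foldl
      (fun (st : List Char × Bool) ch =>
        if PySem.Chars.isalnum ch then (st.1 ++ [PySem.Chars.lowerChar ch], false)
        else if st.2 then st else (st.1 ++ ['-'], true))
      ([], false)
    let slug := PySem.Chars.stripChars st.1 ['-']
    if slug = [] then "default" else String.mk slug

-- ===== PRECONDITION & SPEC =====
def Spec_slugify_token_py (value : String) (out : String) : Prop := out = slugify_token_py_alt value
instance (value : String) (out : String) : Decidable (Spec_slugify_token_py value out) := by unfold Spec_slugify_token_py; infer_instance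

-- ===== CLAIM (what is proved, stated in full; the proofs are below) =====
def Claim_equal_slugify_token_py : Prop := ∀ (value : String), Dom_slugify_token_py value → Spec_slugify_token_py value (slugify_token_py value)

-- ===== LEMMAS AND PROOFS =====

-- canonical "collapse consecutive dashes" form that both programs compute
def dd : List Char → List Char
  | [] => []
  | [c] => [c]
  | c :: d :: rest => if c = '-' ∧ d = '-' then dd (d :: rest) else c :: dd (d :: rest)

theorem dd_cons (c : Char) (x : List Char) :
    dd (c :: x) = if c = '-' ∧ x.head? = some '-' then dd x else c :: dd x := by
  match x with
  | [] => simp [dd]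
  | d :: u => simp [dd]

theorem head?_repDash (s : List Char) : (repDash s).head? = s.head? := by
  induction s using repDash.induct with
  | case1 => rfl
  | case2 c => rfl
  | case3 c d rest h ih => rw [repDash, if_pos h]; simp [h.1]
  | case4 c d rest h ih => rw [repDash, if_neg h]; rfl

theorem dd_repDash (s : List Char) : dd (repDash s) = dd s := by
  induction s using repDash.induct with
  | case1 => rfl
  | case2 c => rfl
  | case3 c d rest h ih =>
    obtain ⟨hc, hd⟩ := h
    subst hc; subst hd
    have hrhs : dd ('-' :: '-' :: rest) = dd ('-' :: rest) := by
      rw [dd, if_pos ⟨rfl, rfl⟩]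
    rw [repDash, if_pos ⟨rfl, rfl⟩, hrhs, dd_cons, dd_cons, head?_repDash]
    by_cases hh : rest.head? = some '-'
    · simp [hh, ih]
    · simp [hh, ih]
  | case4 c d rest h ih =>
    rw [repDash, if_neg h]
    rw [dd_cons, head?_repDash]
    simp only [List.head?_cons]
    rw [if_neg (by intro ⟨h1, h2⟩; exact h ⟨h1, by injection h2⟩)]
    rw [ih]
    rw [show dd (c :: d :: rest) = c :: dd (d :: rest) from by rw [dd, if_neg h]]

theorem dd_of_no_doubledash (s : List Char) (h : ¬ (['-', '-'] <:+: s)) : dd s = s := by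
  induction s using dd.induct with
  | case1 => rfl
  | case2 c => rfl
  | case3 c d rest hcd ih =>
    exfalso
    exact h ⟨[], rest, by rw [hcd.1, hcd.2]; rfl⟩
  | case4 c d rest hcd ih =>
    rw [dd, if_neg hcd, ih]
    intro h'
    exact h ((List.infix_cons_iff).mpr (Or.inr h'))

theorem collapseA_eq_dd (s : List Char) : collapseA s = dd s := by
  induction s using collapseA.induct with
  | case1 s h ih =>
    rw [collapseA, dif_pos h, ih, replace_eq_repDash, dd_repDash]
  | case2 s h =>
    rw [collapseA, dif_neg h]
    exact (dd_of_no_doubledash s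
      ((PySem.Chars.isIn_eq_false_iff _ _).mp (Bool.not_eq_true _ ▸ Bool.of_not_eq_true h))).symm

theorem dd_append_singleton (s : List Char) (c : Char) :
    dd (s ++ [c]) = if c = '-' ∧ s.getLast? = some '-' then dd s else dd s ++ [c] := by
  induction s using dd.induct with
  | case1 => simp [dd]
  | case2 a =>
    by_cases h : a = '-' ∧ c = '-'
    · obtain ⟨h1, h2⟩ := h
      subst h1; subst h2
      simp [dd]
    · rw [if_neg (fun hx => h ⟨by simpa using hx.2, hx.1⟩)]
      rw [show ([a] : List Char) ++ [c] = [a, c] from rfl]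
      simp only [dd]
      rw [if_neg h]
      rfl
  | case3 a b rest h ih =>
    rw [show (a :: b :: rest) ++ [c] = a :: b :: (rest ++ [c]) from rfl]
    rw [dd, if_pos h, dd, if_pos h]
    rw [show b :: (rest ++ [c]) = (b :: rest) ++ [c] from rfl, ih]
    simp
  | case4 a b rest h ih =>
    rw [show (a :: b :: rest) ++ [c] = a :: b :: (rest ++ [c]) from rfl]
    rw [dd, if_neg h, dd, if_neg h]
    rw [show b :: (rest ++ [c]) = (b :: rest) ++ [c] from rfl, ih]
    by_cases hc : c = '-' ∧ (b :: rest).getLast? = some '-'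
    · rw [if_pos hc, if_pos (by simpa using hc)]
    · rw [if_neg hc, if_neg (by simpa using hc)]
      rfl

theorem lower_ne_dash (c : Char) (h : PySem.Chars.isalnum c = true) :
    PySem.Chars.lowerChar c ≠ '-' := by
  have hd : ('-').toNat = 45 := by decide
  intro heq
  have h45 := congrArg Char.toNat heq
  rw [hd] at h45
  unfold PySem.Chars.lowerChar at h45
  by_cases hu : PySem.Chars.isupper c = true
  · rw [if_pos hu] at h45
    unfold PySem.Chars.isupper at hu
    simp only [Bool.and_eq_true, decide_eq_true_eq] at hu
    have h1 : 65 ≤ c.toNat := Fin.mk_le_mk.mp hu.1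
    have h2 : c.toNat ≤ 90 := Fin.mk_le_mk.mp hu.2
    rw [Char.toNat_ofNat, if_pos (Or.inl (by omega : c.toNat + 32 < 0xd800))] at h45
    omega
  · rw [if_neg hu] at h45
    have h' : PySem.Chars.isdigit c = true ∨ PySem.Chars.islower c = true := by
      unfold PySem.Chars.isalnum PySem.Chars.isalpha at h
      simp only [Bool.or_eq_true] at h
      rcases h with (h | h) | h
      · exact absurd h hu
      · exact Or.inr h
      · exact Or.inl h
    rcases h' with h' | h' <;>
    · first
      | (unfold PySem.Chars.isdigit at h'
         simp only [Bool.and_eq_true, decide_eq_true_eq] at h'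
         have h1 : 48 ≤ c.toNat := Fin.mk_le_mk.mp h'.1
         have h2 : c.toNat ≤ 57 := Fin.mk_le_mk.mp h'.2
         omega)
      | (unfold PySem.Chars.islower at h'
         simp only [Bool.and_eq_true, decide_eq_true_eq] at h'
         have h1 : 97 ≤ c.toNat := Fin.mk_le_mk.mp h'.1
         have h2 : c.toNat ≤ 122 := Fin.mk_le_mk.mp h'.2
         omega)

-- the char map both programs apply
def fmap (ch : Char) : Char :=
  if PySem.Chars.isalnum ch then PySem.Chars.lowerChar ch else '-'

theorem foldB (l : List Char) : ∀ (m : List Char),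
    l.foldl
      (fun (st : List Char × Bool) ch =>
        if PySem.Chars.isalnum ch then (st.1 ++ [PySem.Chars.lowerChar ch], false)
        else if st.2 then st else (st.1 ++ ['-'], true))
      (dd m, m.getLast? == some '-')
    = (dd (m ++ l.map fmap), ((m ++ l.map fmap).getLast? == some '-')) := by
  induction l with
  | nil => intro m; simp
  | cons ch t ih =>
    intro m
    rw [List.foldl_cons]
    by_cases ha : PySem.Chars.isalnum ch = true
    · rw [if_pos ha]
      have hne : PySem.Chars.lowerChar ch ≠ '-' := lower_ne_dash ch ha
      have h1 : dd m ++ [PySem.Chars.lowerChar ch] = dd (m ++ [PySem.Chars.lowerChar ch]) := by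
        rw [dd_append_singleton, if_neg (by tauto)]
      have h2 : (false : Bool) =
          ((m ++ [PySem.Chars.lowerChar ch]).getLast? == some '-') := by
        simp [hne]
      rw [h1]
      rw [show (dd (m ++ [PySem.Chars.lowerChar ch]), false)
            = (dd (m ++ [PySem.Chars.lowerChar ch]),
               ((m ++ [PySem.Chars.lowerChar ch]).getLast? == some '-')) from by rw [← h2]]
      rw [ih (m ++ [PySem.Chars.lowerChar ch])]
      simp [fmap, ha]
    · rw [if_neg ha]
      by_cases hp : (m.getLast? == some '-') = true
      · rw [if_pos hp]
        have hl : m.getLast? = some '-' := by simpa using hp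
        have h1 : dd m = dd (m ++ ['-']) := by
          rw [dd_append_singleton, if_pos ⟨rfl, hl⟩]
        have h2 : ((m ++ ['-']).getLast? == some '-') = true := by simp
        rw [show ((dd m, m.getLast? == some '-') : List Char × Bool)
              = (dd (m ++ ['-']), ((m ++ ['-']).getLast? == some '-')) from by
            rw [← h1, hp, h2]]
        rw [ih (m ++ ['-'])]
        simp [fmap, ha]
      · rw [if_neg hp]
        have hl : ¬ m.getLast? = some '-' := by simpa using hp
        have h1 : dd m ++ ['-'] = dd (m ++ ['-']) := by
          rw [dd_append_singleton, if_neg (by tauto)]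
        have h2 : ((m ++ ['-']).getLast? == some '-') = true := by simp
        rw [h1, show ((dd (m ++ ['-']), true) : List Char × Bool)
              = (dd (m ++ ['-']), ((m ++ ['-']).getLast? == some '-')) from by rw [h2]]
        rw [ih (m ++ ['-'])]
        simp [fmap, ha]

-- ===== VERDICT (by name: the statement is the Claim_ definition above) =====
theorem slugify_token_py_spec : Claim_equal_slugify_token_py := by
  intro value _
  unfold Spec_slugify_token_py slugify_token_py slugify_token_py_alt
  by_cases hv : value = ""
  · rw [if_pos hv, if_pos hv]
  · rw [if_neg hv, if_neg hv]
    have hA : collapseA (value.toList.map fmap) = dd (value.toList.map fmap) :=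
      collapseA_eq_dd _
    have hB := foldB value.toList []
    rw [show ((dd [], List.getLast? ([] : List Char) == some '-') : List Char × Bool)
          = (([] : List Char), false) from rfl] at hB
    simp only [List.nil_append] at hB
    rw [show (fun ch => if PySem.Chars.isalnum ch = true then PySem.Chars.lowerChar ch else '-') = fmap from rfl]
    simp only [hB, hA]
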